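-- pv_equiv track=rewrite | github.com/pypi-data/pypi-mirror-401 | packages/arthexis/arthexis-0.2.0.tar.gz/arthexis-0.2.0/apps/summary/services.py | parse_screens
-- ===== SOURCE A (Python) =====
-- def parse_screens(output: str) -> list[tuple[str, str]]:
--     if not output:
--         return []
--     cleaned = [line.rstrip() for line in output.splitlines()]
--     groups: list[list[str]] = []
--     current: list[str] = []
--     for line in cleaned:
--         if not line.strip():
--             continue
--         if line.strip() == "---":
--             if current:
--                 groups.append(current)
--                 current = []
--             continue
--         if line.lower().startswith("screen"):
--             continue
--         current.append(line)
--     if current: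
--         groups.append(current)
--
--     screens: list[tuple[str, str]] = []
--     for group in groups:
--         if len(group) < 2:
--             continue
--         screens.append((group[0], group[1]))
--     return screens
-- ===== SOURCE B (Python) =====
-- def parse_screens(output: str) -> list[tuple[str, str]]:
--     # single pass: keep only the first two lines of the current group plus the result list
--     if not output:
--         return []
--     screens: list[tuple[str, str]] = []
--     buf: list[str] = []
--     for raw in output.splitlines():
--         line = raw.rstrip()
--         s = line.strip()
--         if not s:
--             continue
--         if s == "---":
--             if len(buf) >= 2:
--                 screens.append((buf[0], buf[1]))
--             buf = []
--             continue
--         if line.lower().startswith("screen"):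
--             continue
--         if len(buf) < 2:
--             buf.append(line)
--     if len(buf) >= 2:
--         screens.append((buf[0], buf[1]))
--     return screens
-- ===== Notes on version B (the rewrite author's own statement) =====
-- stated objective: simpler
-- what changed: B drops A's intermediate list-of-groups and second emit pass: one pass over the lines keeps only the first two lines of the current group in a small buffer and appends the (name,value) pair whenever a group closes.
import Mathlib
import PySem

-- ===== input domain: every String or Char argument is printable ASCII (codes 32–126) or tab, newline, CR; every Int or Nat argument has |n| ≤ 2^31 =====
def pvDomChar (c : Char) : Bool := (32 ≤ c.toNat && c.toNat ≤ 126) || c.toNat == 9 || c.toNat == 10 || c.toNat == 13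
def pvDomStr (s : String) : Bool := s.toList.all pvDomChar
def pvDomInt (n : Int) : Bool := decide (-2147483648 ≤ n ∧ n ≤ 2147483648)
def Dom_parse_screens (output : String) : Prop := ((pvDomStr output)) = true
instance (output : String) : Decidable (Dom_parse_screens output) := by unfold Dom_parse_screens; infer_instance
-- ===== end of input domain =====

-- B replaces A's intermediate list-of-groups + second emit pass by a single pass with a two-line buffer (simpler decomposition, same cost).

-- ===== PORT A =====
def stepA (st : List (List String) × List String) (line : String) : List (List String) × List String :=
  if PySem.Str.strip line = "" then st
  else if PySem.Str.strip line = "---" then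
    (if st.2 = [] then st else (st.1 ++ [st.2], []))
  else if PySem.Str.startswith (PySem.Str.lower line) "screen" then st
  else (st.1, st.2 ++ [line])

def emitA (init : List (String × String)) (groups : List (List String)) : List (String × String) :=
  groups.foldl (fun screens group =>
    if group.length < 2 then screens else screens ++ [(group[0]!, group[1]!)]) init

def parse_screens (output : String) : List (String × String) :=
  if output = "" then []
  else
    let cleaned := (PySem.Str.splitlines output).map PySem.Str.rstrip
    let st := cleaned.foldl stepA ([], [])
    let groups := if st.2 = [] then st.1 else st.1 ++ [st.2]
    emitA [] groups

-- ===== PORT B =====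
def stepB (st : List (String × String) × List String) (raw : String) : List (String × String) × List String :=
  let line := PySem.Str.rstrip raw
  let s := PySem.Str.strip line
  if s = "" then st
  else if s = "---" then
    ((if 2 ≤ st.2.length then st.1 ++ [(st.2[0]!, st.2[1]!)] else st.1), [])
  else if PySem.Str.startswith (PySem.Str.lower line) "screen" then st
  else if st.2.length < 2 then (st.1, st.2 ++ [line]) else st

def parse_screens_alt (output : String) : List (String × String) :=
  if output = "" then []
  else
    let st := (PySem.Str.splitlines output).foldl stepB ([], [])
    if 2 ≤ st.2.length then st.1 ++ [(st.2[0]!, st.2[1]!)] else st.1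

-- ===== PRECONDITION & SPEC =====
def Spec_parse_screens (output : String) (out : List (String × String)) : Prop := out = parse_screens_alt output
instance (output : String) (out : List (String × String)) : Decidable (Spec_parse_screens output out) := by unfold Spec_parse_screens; infer_instance

-- ===== CLAIM (what is proved, stated in full; the proofs are below) =====
def Claim_equal_parse_screens : Prop := ∀ (output : String), Dom_parse_screens output → Spec_parse_screens output (parse_screens output)

-- ===== LEMMAS AND PROOFS =====

-- stepB with the rstrip factored out (A folds over already-rstripped lines)
def stepB' (st : List (String × String) × List String) (line : String) : List (String × String) × List String :=
  if PySem.Str.strip line = "" then st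
  else if PySem.Str.strip line = "---" then
    ((if 2 ≤ st.2.length then st.1 ++ [(st.2[0]!, st.2[1]!)] else st.1), [])
  else if PySem.Str.startswith (PySem.Str.lower line) "screen" then st
  else if st.2.length < 2 then (st.1, st.2 ++ [line]) else st

theorem stepB_eq : stepB = fun st raw => stepB' st (PySem.Str.rstrip raw) := rfl

def finishA (st : List (List String) × List String) : List (String × String) :=
  emitA [] (if st.2 = [] then st.1 else st.1 ++ [st.2])

def finishB (st : List (String × String) × List String) : List (String × String) :=
  if 2 ≤ st.2.length then st.1 ++ [(st.2[0]!, st.2[1]!)] else st.1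

theorem emitA_shift (groups : List (List String)) (init : List (String × String)) :
    emitA init groups = init ++ emitA [] groups := by
  induction groups generalizing init with
  | nil => simp [emitA]
  | cons g gs ih =>
      simp only [emitA, List.foldl_cons] at *
      by_cases h : g.length < 2
      · rw [if_pos h, if_pos h]; exact ih init
      · rw [if_neg h, if_neg h, ih (init ++ [(g[0]!, g[1]!)]), ih ([] ++ [(g[0]!, g[1]!)])]
        simp

theorem emitA_append (g1 g2 : List (List String)) :
    emitA [] (g1 ++ g2) = emitA [] g1 ++ emitA [] g2 := by
  simp only [emitA, List.foldl_append]
  rw [show List.foldl _ ([] : List (String × String)) g1 = emitA [] g1 from rfl,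
      show ∀ i, List.foldl _ i g2 = emitA i g2 from fun _ => rfl]
  exact emitA_shift g2 _

theorem foldA_prefix (ls : List String) (g : List (List String)) (cur : List String) :
    List.foldl stepA (g, cur) ls =
      (g ++ (List.foldl stepA ([], cur) ls).1, (List.foldl stepA ([], cur) ls).2) := by
  induction ls generalizing g cur with
  | nil => simp
  | cons l ls ih =>
      simp only [List.foldl_cons]
      have hs : stepA (g, cur) l = (g ++ (stepA ([], cur) l).1, (stepA ([], cur) l).2) := by
        simp only [stepA]
        split_ifs <;> simp
      rw [hs, ih, ih (stepA ([], cur) l).1 (stepA ([], cur) l).2]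
      simp

theorem foldB_prefix (ls : List String) (s : List (String × String)) (b : List String) :
    List.foldl stepB' (s, b) ls =
      (s ++ (List.foldl stepB' ([], b) ls).1, (List.foldl stepB' ([], b) ls).2) := by
  induction ls generalizing s b with
  | nil => simp
  | cons l ls ih =>
      simp only [List.foldl_cons]
      have hs : stepB' (s, b) l = (s ++ (stepB' ([], b) l).1, (stepB' ([], b) l).2) := by
        simp only [stepB']
        split_ifs <;> simp
      rw [hs, ih, ih (stepB' ([], b) l).1 (stepB' ([], b) l).2]
      simp

theorem finishA_prefix (ls : List String) (g : List (List String)) (cur : List String) :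
    finishA (List.foldl stepA (g, cur) ls) = emitA [] g ++ finishA (List.foldl stepA ([], cur) ls) := by
  rw [foldA_prefix]
  unfold finishA
  rcases List.foldl stepA ([], cur) ls with ⟨ga, ca⟩
  dsimp only
  by_cases hca : ca = []
  · subst hca; rw [if_pos rfl, if_pos rfl]; exact emitA_append g ga
  · rw [if_neg hca, if_neg hca, List.append_assoc, emitA_append]

theorem finishB_prefix (ls : List String) (s : List (String × String)) (b : List String) :
    finishB (List.foldl stepB' (s, b) ls) = s ++ finishB (List.foldl stepB' ([], b) ls) := by
  rw [foldB_prefix]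
  unfold finishB
  rcases List.foldl stepB' ([], b) ls with ⟨gb, cb⟩
  dsimp only
  by_cases h : 2 ≤ cb.length
  · simp [h]
  · simp [h]

theorem emitA_single (cur : List String) :
    emitA [] [cur] = if 2 ≤ cur.length then [(cur[0]!, cur[1]!)] else [] := by
  by_cases h : cur.length < 2
  · simp only [emitA, List.foldl_cons, List.foldl_nil, if_pos h]
    rw [if_neg (by omega)]
  · simp only [emitA, List.foldl_cons, List.foldl_nil, if_neg h]
    rw [if_pos (by omega)]
    simp

theorem take2_pair (cur : List String) (h : 2 ≤ cur.length) :
    ((cur.take 2)[0]!, (cur.take 2)[1]!) = (cur[0]!, cur[1]!) := by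
  match cur with
  | a :: b :: rest => rfl
  | [] => simp at h
  | [a] => simp at h

set_option maxHeartbeats 1000000 in
theorem main_inv (ls : List String) (cur : List String) :
    finishA (List.foldl stepA ([], cur) ls) = finishB (List.foldl stepB' ([], cur.take 2) ls) := by
  induction ls generalizing cur with
  | nil =>
      simp only [List.foldl_nil, finishA, finishB]
      match cur with
      | [] => simp [emitA]
      | [a] => simp [emitA]
      | a :: b :: rest => simp [emitA]
  | cons l ls ih =>
      rw [List.foldl_cons, List.foldl_cons]
      by_cases h1 : PySem.Str.strip l = ""
      · have hA : stepA ([], cur) l = ([], cur) := by unfold stepA; dsimp only; rw [if_pos h1]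
        have hB : stepB' ([], cur.take 2) l = ([], cur.take 2) := by unfold stepB'; dsimp only; rw [if_pos h1]
        rw [hA, hB]; exact ih cur
      · by_cases h2 : PySem.Str.strip l = "---"
        · by_cases hc : cur = []
          · have hA : stepA ([], cur) l = ([], cur) := by
              unfold stepA; dsimp only; rw [if_neg h1, if_pos h2, if_pos hc]
            have hB : stepB' ([], cur.take 2) l = ([], []) := by
              unfold stepB'; dsimp only; rw [if_neg h1, if_pos h2, hc]
              rfl
            rw [hA, hB, hc]
            simpa using ih []
          · have hA : stepA ([], cur) l = ([cur], []) := by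
              unfold stepA; dsimp only; rw [if_neg h1, if_pos h2, if_neg hc]; simp
            have hB : stepB' ([], cur.take 2) l =
                ((if 2 ≤ (cur.take 2).length then [((cur.take 2)[0]!, (cur.take 2)[1]!)] else []), []) := by
              unfold stepB'; dsimp only; rw [if_neg h1, if_pos h2]; simp
            rw [hA, hB]
            have hlen2 : (2 ≤ (cur.take 2).length) ↔ (2 ≤ cur.length) := by
              rw [List.length_take]; omega
            rw [finishA_prefix, finishB_prefix, emitA_single]
            have hrest := ih ([] : List String)
            simp only [List.take_nil] at hrest
            rw [hrest]
            by_cases hl2 : 2 ≤ cur.length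
            · rw [if_pos hl2, if_pos (hlen2.mpr hl2), take2_pair cur hl2]
            · rw [if_neg hl2, if_neg (fun h => hl2 (hlen2.mp h))]
        · by_cases h3 : PySem.Str.startswith (PySem.Str.lower l) "screen" = true
          · have hA : stepA ([], cur) l = ([], cur) := by
              unfold stepA; dsimp only; rw [if_neg h1, if_neg h2, if_pos h3]
            have hB : stepB' ([], cur.take 2) l = ([], cur.take 2) := by
              unfold stepB'; dsimp only; rw [if_neg h1, if_neg h2, if_pos h3]
            rw [hA, hB]; exact ih cur
          · have hA : stepA ([], cur) l = ([], cur ++ [l]) := by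
              unfold stepA; dsimp only; rw [if_neg h1, if_neg h2, if_neg h3]
            rw [hA]
            by_cases hlen : (cur.take 2).length < 2
            · have hB : stepB' ([], cur.take 2) l = ([], cur.take 2 ++ [l]) := by
                unfold stepB'; dsimp only; rw [if_neg h1, if_neg h2, if_neg h3, if_pos hlen]
              have htk : cur.take 2 ++ [l] = (cur ++ [l]).take 2 := by
                have hc : cur.length < 2 := by rw [List.length_take] at hlen; omega
                match cur with
                | [] => rfl
                | [a] => rfl
                | a :: b :: rest => simp at hc
              rw [hB, htk]; exact ih (cur ++ [l])
            · have hB : stepB' ([], cur.take 2) l = ([], cur.take 2) := by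
                unfold stepB'; dsimp only; rw [if_neg h1, if_neg h2, if_neg h3, if_neg hlen]
              have hc2 : 2 ≤ cur.length := by rw [List.length_take] at hlen; omega
              have htk : cur.take 2 = (cur ++ [l]).take 2 := by
                rw [List.take_append_of_le_length hc2]
              rw [hB, htk]; exact ih (cur ++ [l])

-- ===== VERDICT (by name: the statement is the Claim_ definition above) =====
theorem parse_screens_spec : Claim_equal_parse_screens := by
  intro output _
  unfold Spec_parse_screens parse_screens parse_screens_alt
  by_cases h : output = ""
  · simp [h]
  · rw [if_neg h, if_neg h]
    rw [stepB_eq, ← List.foldl_map]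
    have := main_inv ((PySem.Str.splitlines output).map PySem.Str.rstrip) []
    simpa [finishA, finishB] using this
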